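-- pv_equiv track=rewrite | github.com/stefanoalimonti/carry-arithmetic-D-factorization-limits | experiments/D03_phantom_decomposition.py | fast_bfs_entropy
-- ===== SOURCE A (Python) =====
-- def fast_bfs_entropy(N, max_pos=None):
--     D = N.bit_length()
--     if max_pos is None:
--         max_pos = D + 2
--     N_bits = [(N >> i) & 1 for i in range(max_pos + 1)]
--
--     states = [(1, 1, 1)]
--     curve = []
--
--     for k in range(1, max_pos):
--         next_states = []
--         target = N_bits[k]
--
--         c0 = 0
--         Mk = N % (1 << (k + 1))
--
--         for pp, qq, P_prev in states:
--             P_old_k_bit = ((pp * qq) >> k) & 1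
--             xor_ab = target ^ P_old_k_bit
--
--             valid_pairs = [(0, 0), (1, 1)] if xor_ab == 0 else [(0, 1), (1, 0)]
--
--             for a, b in valid_pairs:
--                 np_ = pp | (a << k)
--                 nq_ = qq | (b << k)
--
--                 ck = 0
--                 for i in range(k + 1):
--                     ai = (np_ >> i) & 1
--                     bki = (nq_ >> (k - i)) & 1
--                     ck += ai * bki
--
--                 Pk = P_prev + (ck << k)
--                 next_states.append((np_, nq_, Pk))
--
--                 # Pk is the carry-free convolution sum Σ conv_j·2^j.
--                 # For BFS states, (np_·nq_) mod 2^{k+1} = Mk always holds.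
--                 # Pk == Mk iff there is no carry propagation at columns 0..k,
--                 # i.e., this is equivalent to the carry-zero condition c_{k+1}=0
--                 # of Definition 2 in the paper.
--                 if Pk == Mk:
--                     c0 += 1
--
--         curve.append((k, len(next_states), c0))
--         states = next_states
--
--         if len(states) > 1_500_000:
--             break
--
--     return curve
-- ===== SOURCE B (Python) =====
-- def fast_bfs_entropy(N, max_pos=None):
--     # DFS over the binary tree of factor-bit choices instead of A's BFS level lists:
--     # per-node contributions to each level's carry-free-match count are returned as a
--     # list and summed pointwise; the per-child convolution column is one popcount over
--     # an incrementally maintained bit-reversal rq of q, and level sizes are 1 << k.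
--     if max_pos is None:
--         max_pos = N.bit_length() + 2
--     cutoff = (1_500_000).bit_length()   # first k with 2**k > 1_500_000
--     depth = min(max_pos - 1, cutoff)
--     if depth < 0:
--         depth = 0
--
--     def child(k, p, q, P, rq, xor, a):
--         b = a ^ xor
--         np_ = p | (a << k)
--         nq_ = q | (b << k)
--         rq2 = (rq << 1) | b
--         Pk = P + ((np_ & rq2).bit_count() << k)
--         return np_, nq_, Pk, rq2
--
--     def dfs(rem, k, p, q, P, rq):
--         # c0 contributions of this subtree at levels k .. k+rem-1
--         if rem == 0:
--             return []
--         target = (N >> k) & 1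
--         Mk = N % (1 << (k + 1))
--         xor = target ^ ((p * q >> k) & 1)
--         s0 = child(k, p, q, P, rq, xor, 0)
--         s1 = child(k, p, q, P, rq, xor, 1)
--         hits = (1 if s0[2] == Mk else 0) + (1 if s1[2] == Mk else 0)
--         l0 = dfs(rem - 1, k + 1, *s0)
--         l1 = dfs(rem - 1, k + 1, *s1)
--         return [hits] + [x + y for x, y in zip(l0, l1)]
--
--     c0 = dfs(depth, 1, 1, 1, 1, 1)
--     return [(k, 1 << k, c0[k - 1]) for k in range(1, depth + 1)]
-- ===== Notes on version B (the rewrite author's own statement) =====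
-- stated objective: alternative
-- what changed: A runs a BFS that materializes the full list of (p,q,P) states at every level and recomputes each child's convolution column with an O(k) inner loop; B instead does a depth-first recursion over the binary tree of factor-bit choices, returning each subtree's per-level carry-free-match counts as a list summed pointwise, computes the column as a single popcount over an incrementally maintained bit-reversal of q, and emits the level sizes in closed form as 1 << k.
import Mathlib
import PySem

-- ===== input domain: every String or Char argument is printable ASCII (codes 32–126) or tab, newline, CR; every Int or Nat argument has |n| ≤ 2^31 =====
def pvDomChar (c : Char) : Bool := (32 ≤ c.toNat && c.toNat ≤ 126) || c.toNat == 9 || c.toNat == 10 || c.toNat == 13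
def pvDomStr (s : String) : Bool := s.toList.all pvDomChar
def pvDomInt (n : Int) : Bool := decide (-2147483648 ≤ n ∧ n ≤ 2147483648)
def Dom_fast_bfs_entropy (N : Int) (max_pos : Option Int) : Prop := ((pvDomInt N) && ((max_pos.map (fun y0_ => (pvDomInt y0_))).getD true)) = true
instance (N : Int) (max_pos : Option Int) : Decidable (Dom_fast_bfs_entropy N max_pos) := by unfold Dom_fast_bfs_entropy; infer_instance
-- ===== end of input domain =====

-- B replaces A's BFS over materialized level-lists of states by a depth-first recursion over
-- the binary tree of factor-bit choices that returns each subtree's per-level match counts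
-- as a list summed pointwise, computes the convolution column as one popcount over an
-- incrementally maintained bit-reversal of q, and emits level sizes as 1 << k (alternative
-- algorithm of similar cost: it trades A's O(k) inner column loop and materialized state
-- lists for popcounts and recursion).

-- ===== PORT A =====
-- inner loop of A: ck = Σ_{i=0..k} ((np_>>i)&1)·((nq_>>(k-i))&1)
def pvA_ck (np_ nq_ : Int) (k : Nat) : Int :=
  (List.range (k + 1)).foldl
    (fun ck (i : Nat) => ck + PySem.Int.band (np_ >>> i) 1 * PySem.Int.band (nq_ >>> (k - i)) 1) 0

-- body of A's `for pp, qq, P_prev in states` loop, for one state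
def pvA_step (target Mk : Int) (k : Nat) (acc : List (Int × Int × Int) × Int)
    (st : Int × Int × Int) : List (Int × Int × Int) × Int :=
  let pp : Int := st.1
  let qq : Int := st.2.1
  let P_prev : Int := st.2.2
  let P_old_k_bit := PySem.Int.band ((pp * qq) >>> k) 1
  let xor_ab := PySem.Int.bxor target P_old_k_bit
  let valid_pairs : List (Int × Int) :=
    if xor_ab = 0 then [(0, 0), (1, 1)] else [(0, 1), (1, 0)]
  valid_pairs.foldl
    (fun acc ab =>
      let np_ := PySem.Int.bor pp ((ab.1 : Int) <<< k)
      let nq_ := PySem.Int.bor qq ((ab.2 : Int) <<< k)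
      let ck := pvA_ck np_ nq_ k
      let Pk := P_prev + (ck <<< k)
      ((np_, nq_, Pk) :: acc.1, if Pk = Mk then acc.2 + 1 else acc.2))
    acc

-- one BFS level of A (children consed while folding, reversed at the end)
def pvA_level (target Mk : Int) (k : Nat) (states : List (Int × Int × Int)) :
    List (Int × Int × Int) × Int :=
  let r := states.foldl (pvA_step target Mk k) ([], 0)
  (r.1.reverse, r.2)

-- N_bits = [(N >> i) & 1 for i in range(max_pos + 1)]
def pvA_Nbits (N mp : Int) : List Int :=
  (PySem.List.pyRange 0 (mp + 1)).map (fun i => PySem.Int.band (N >>> i.toNat) 1)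
  -- every i of pyRange 0 (mp+1) is ≥ 0, so i.toNat is exact

-- `for k in range(1, max_pos)` with the `break`: n = iterations left
def pvA_loop (N : Int) (N_bits : List Int) (k : Nat) (states : List (Int × Int × Int))
    (curve : List (Int × Int × Int)) : Nat → List (Int × Int × Int)
  | 0 => curve
  | n + 1 =>
    let target := PySem.List.pyGetD N_bits (k : Int) 0   -- N_bits[k]; 1 ≤ k < max_pos < len(N_bits): always in range
    let Mk := PySem.Int.mod N ((1 : Int) <<< (k + 1))
    let st := pvA_level target Mk k states
    let curve' := curve ++ [((k : Int), (st.1.length : Int), st.2)]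
    if st.1.length > 1500000 then curve'
    else pvA_loop N N_bits (k + 1) st.1 curve' n

def fast_bfs_entropy (N : Int) (max_pos : Option Int) : List (Int × Int × Int) :=
  let mp : Int := match max_pos with
    | none => (PySem.Int.bitLength N : Int) + 2
    | some m => m
  pvA_loop N (pvA_Nbits N mp) 1 [(1, 1, 1)] [] (mp - 1).toNat   -- range(1, mp) has (mp-1).toNat elements

-- ===== PORT B =====
-- Source B's `child`: one child state (np_, nq_, Pk, rq2); rq2 is the incrementally maintained
-- bit-reversal of nq_'s low bits, so Pk's new column is the single popcount of np_ & rq2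
def pvB_child (k : Nat) (p q P rq xor a : Int) : Int × Int × Int × Int :=
  let b := PySem.Int.bxor a xor
  let np_ := PySem.Int.bor p (a <<< k)
  let nq_ := PySem.Int.bor q (b <<< k)
  let rq2 := PySem.Int.bor (rq <<< 1) b
  let Pk := P + ((PySem.Int.bitCount (PySem.Int.band np_ rq2) : Int) <<< k)
  (np_, nq_, Pk, rq2)

-- Source B's `dfs`: per-subtree list of c0 contributions for levels k .. k+rem-1,
-- children's lists summed pointwise ([x + y for x, y in zip(l0, l1)])
def pvB_dfs (N : Int) : Nat → Nat → Int → Int → Int → Int → List Int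
  | 0, _, _, _, _, _ => []
  | rem + 1, k, p, q, P, rq =>
    let target := PySem.Int.band (N >>> k) 1
    let Mk := PySem.Int.mod N ((1 : Int) <<< (k + 1))
    let xor := PySem.Int.bxor target (PySem.Int.band ((p * q) >>> k) 1)
    let s0 := pvB_child k p q P rq xor 0
    let s1 := pvB_child k p q P rq xor 1
    let hits : Int := (if s0.2.2.1 = Mk then 1 else 0) + (if s1.2.2.1 = Mk then 1 else 0)
    let l0 := pvB_dfs N rem (k + 1) s0.1 s0.2.1 s0.2.2.1 s0.2.2.2
    let l1 := pvB_dfs N rem (k + 1) s1.1 s1.2.1 s1.2.2.1 s1.2.2.2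
    hits :: List.zipWith (· + ·) l0 l1

def fast_bfs_entropy_alt (N : Int) (max_pos : Option Int) : List (Int × Int × Int) :=
  let mp : Int := match max_pos with
    | none => (PySem.Int.bitLength N : Int) + 2
    | some m => m
  let cutoff : Int := (PySem.Int.bitLength 1500000 : Int)   -- first k with 2**k > 1_500_000
  let depth : Nat := (min (mp - 1) cutoff).toNat            -- `if depth < 0: depth = 0` = toNat
  let c0 := pvB_dfs N depth 1 1 1 1 1
  (PySem.List.pyRange 1 ((depth : Int) + 1) 1).map
    (fun k => (k, (1 : Int) <<< k, PySem.List.pyGetD c0 (k - 1) 0))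
  -- every k of pyRange 1 (depth+1) has 1 ≤ k ≤ depth, so the Int shift and c0[k-1] are exact

-- ===== PRECONDITION & SPEC =====
def Spec_fast_bfs_entropy (N : Int) (max_pos : Option Int) (out : List (Int × Int × Int)) : Prop := out = fast_bfs_entropy_alt N max_pos
instance (N : Int) (max_pos : Option Int) (out : List (Int × Int × Int)) : Decidable (Spec_fast_bfs_entropy N max_pos out) := by unfold Spec_fast_bfs_entropy; infer_instance

-- ===== CLAIM (what is proved, stated in full; the proofs are below) =====
def Claim_equal_fast_bfs_entropy : Prop := ∀ (N : Int) (max_pos : Option Int), Dom_fast_bfs_entropy N max_pos → Spec_fast_bfs_entropy N max_pos (fast_bfs_entropy N max_pos)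

-- ===== LEMMAS AND PROOFS =====

-- ---- proof-side intermediate: a BFS over 4-tuple states (p, q, P, rq) mirroring A's loop
-- shape but with B's per-child arithmetic; A is brought to it state-by-state, B level-by-level.

def pvS_step (target Mk : Int) (k : Nat) (acc : List (Int × Int × Int × Int) × Int)
    (st : Int × Int × Int × Int) : List (Int × Int × Int × Int) × Int :=
  let pp : Int := st.1
  let qq : Int := st.2.1
  let P_prev : Int := st.2.2.1
  let rq : Int := st.2.2.2
  let xor_ab := PySem.Int.bxor target (PySem.Int.band ((pp * qq) >>> k) 1)
  [(0 : Int), 1].foldl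
    (fun acc a =>
      let s := pvB_child k pp qq P_prev rq xor_ab a
      (s :: acc.1, if s.2.2.1 = Mk then acc.2 + 1 else acc.2))
    acc

def pvS_level (target Mk : Int) (k : Nat) (states : List (Int × Int × Int × Int)) :
    List (Int × Int × Int × Int) × Int :=
  let r := states.foldl (pvS_step target Mk k) ([], 0)
  (r.1.reverse, r.2)

def pvS_loop (N : Int) (k : Nat) (states : List (Int × Int × Int × Int))
    (curve : List (Int × Int × Int)) : Nat → List (Int × Int × Int)
  | 0 => curve
  | n + 1 =>
    let target := PySem.Int.band (N >>> k) 1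
    let Mk := PySem.Int.mod N ((1 : Int) <<< (k + 1))
    let st := pvS_level target Mk k states
    let curve' := curve ++ [((k : Int), (st.1.length : Int), st.2)]
    if st.1.length > 1500000 then curve'
    else pvS_loop N (k + 1) st.1 curve' n

-- ---- part 1: A's loop equals the intermediate BFS (bit-level reasoning) ----

-- projection from a 4-tuple state to an A-state
def pvProj (s : Int × Int × Int × Int) : Int × Int × Int := (s.1, s.2.1, s.2.2.1)

-- invariant of a 4-tuple state at level k: components are (casts of) naturals below 2^k and
-- the 4th component holds the bit-reversal of the low k bits of the 2nd
def pvInv (k : Nat) (s : Int × Int × Int × Int) : Prop :=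
  ∃ p q r : Nat, s.1 = (p : Int) ∧ s.2.1 = (q : Int) ∧ s.2.2.2 = (r : Int) ∧
    p < 2 ^ k ∧ q < 2 ^ k ∧ r < 2 ^ k ∧
    ∀ i, i < k → r.testBit i = q.testBit (k - 1 - i)

lemma pvShift_mod_two (m i : Nat) : (m >>> i) % 2 = if m.testBit i then 1 else 0 := by
  rw [Nat.shiftRight_eq_div_pow, Nat.testBit_eq_decide_div_mod_eq]
  rcases Nat.mod_two_eq_zero_or_one (m / 2 ^ i) with h | h <;> simp [h]

-- popcount of m < 2^w is the sum of its low w bits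
lemma pvPop_sum : ∀ (w m : Nat), m < 2 ^ w →
    PySem.Int.bitCount (m : Int) = ((List.range w).map (fun i => (m >>> i) % 2)).sum
  | 0, m, h => by
      have : m = 0 := by omega
      simp [this, PySem.Int.bitCount_zero]
  | w + 1, m, h => by
      rcases Nat.eq_zero_or_pos m with h0 | h0
      · simp [h0, PySem.Int.bitCount_zero, Nat.zero_shiftRight]
      · have hdiv : m / 2 < 2 ^ w := by
          have : (2 : Nat) ^ (w + 1) = 2 * 2 ^ w := by ring
          omega
        rw [PySem.Int.bitCount_natCast h0, pvPop_sum w (m / 2) hdiv,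
          List.range_succ_eq_map]
        simp only [List.map_cons, List.map_map, List.sum_cons, Nat.shiftRight_zero]
        congr 1
        apply congrArg
        apply List.map_congr_left
        intro i _
        simp only [Function.comp]
        rw [Nat.shiftRight_eq_div_pow, Nat.shiftRight_eq_div_pow, Nat.div_div_eq_div_mul]
        congr 1
        rw [Nat.pow_succ]
        ring

lemma pvBit_or_shift_low (q b k j : Nat) (hj : j < k) :
    (q ||| b <<< k).testBit j = q.testBit j := by
  simp [Nat.testBit_or, Nat.testBit_shiftLeft, show ¬ k ≤ j by omega]

lemma pvBit_or_shift_high (q b k : Nat) (hq : q < 2 ^ k) (hb : b ≤ 1) :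
    (q ||| b <<< k).testBit k = decide (b = 1) := by
  rw [Nat.testBit_or, Nat.testBit_shiftLeft, Nat.testBit_lt_two_pow hq]
  interval_cases b <;> simp

-- the incrementally maintained reversal has the right bits
lemma pvRq2_testBit (r q b k : Nat) (hq : q < 2 ^ k) (hb : b ≤ 1)
    (hbits : ∀ i, i < k → r.testBit i = q.testBit (k - 1 - i)) :
    ∀ i, i < k + 1 → (r <<< 1 ||| b).testBit i = (q ||| b <<< k).testBit (k - i) := by
  intro i hi
  cases i with
  | zero =>
    rw [Nat.sub_zero, pvBit_or_shift_high q b k hq hb, Nat.testBit_or, Nat.testBit_shiftLeft]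
    interval_cases b <;> simp
  | succ j =>
    have hjk : j < k := by omega
    have hb2 : b.testBit (j + 1) = false := by
      apply Nat.testBit_lt_two_pow
      have : (2 : Nat) ≤ 2 ^ (j + 1) := Nat.one_lt_two_pow (by omega)
      omega
    rw [show k - (j + 1) = k - 1 - j by omega, pvBit_or_shift_low q b k _ (by omega),
      ← hbits j hjk, Nat.testBit_or, Nat.testBit_shiftLeft, hb2]
    simp [show (1 : Nat) ≤ j + 1 by omega]

lemma pvFoldl_add_cast (f : Nat → Int) (g : Nat → Nat) (hfg : ∀ i, f i = (g i : Int)) :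
    ∀ (l : List Nat) (c : Int),
    l.foldl (fun s i => s + f i) c = c + ((l.map g).sum : Int)
  | [], c => by simp
  | i :: l, c => by
      rw [List.foldl_cons, hfg i, pvFoldl_add_cast f g hfg l (c + g i)]
      simp only [List.map_cons, List.sum_cons]
      rw [Nat.cast_add]
      ring

-- A's inner loop over Int, as a Nat sum
lemma pvA_ck_cast (m n k : Nat) :
    pvA_ck (m : Int) (n : Int) k =
      ((((List.range (k + 1)).map
          (fun i => ((m >>> i) % 2) * ((n >>> (k - i)) % 2))).sum : Nat) : Int) := by
  unfold pvA_ck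
  have hterm : ∀ (i : Nat),
      PySem.Int.band ((m : Int) >>> i) 1 * PySem.Int.band ((n : Int) >>> (k - i)) 1
        = (((((m >>> i) % 2) * ((n >>> (k - i)) % 2)) : Nat) : Int) := by
    intro i
    rw [show ((m : Int) >>> i) = ((m >>> i : Nat) : Int) from rfl,
      show ((n : Int) >>> (k - i)) = ((n >>> (k - i) : Nat) : Int) from rfl,
      PySem.Int.band_one, PySem.Int.band_one,
      PySem.Int.mod_eq_emod_of_pos (by norm_num), PySem.Int.mod_eq_emod_of_pos (by norm_num)]
    have hmod : ∀ x : Nat, ((x : Int)) % 2 = ((x % 2 : Nat) : Int) := by intro x; omega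
    rw [hmod, hmod, ← Nat.cast_mul]
  rw [pvFoldl_add_cast
      (fun i => PySem.Int.band ((m : Int) >>> i) 1 * PySem.Int.band ((n : Int) >>> (k - i)) 1)
      (fun i => ((m >>> i) % 2) * ((n >>> (k - i)) % 2)) hterm]
  simp

-- the crux: A's convolution-column sum equals B's popcount of np & rq2
lemma pvCk_eq (k p q r a b : Nat) (hp : p < 2 ^ k) (hq : q < 2 ^ k)
    (ha : a ≤ 1) (hb : b ≤ 1)
    (hbits : ∀ i, i < k → r.testBit i = q.testBit (k - 1 - i)) :
    pvA_ck ((p ||| a <<< k : Nat) : Int) ((q ||| b <<< k : Nat) : Int) k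
      = ((PySem.Int.bitCount (((p ||| a <<< k) &&& (r <<< 1 ||| b) : Nat) : Int) : Nat) : Int) := by
  have hnp : p ||| a <<< k < 2 ^ (k + 1) := by
    apply Nat.or_lt_two_pow
    · calc p < 2 ^ k := hp
        _ ≤ 2 ^ (k + 1) := Nat.pow_le_pow_right (by omega) (by omega)
    · rw [Nat.shiftLeft_eq]
      have h2 : (2 : Nat) ^ (k + 1) = 2 * 2 ^ k := by ring
      have := Nat.two_pow_pos k
      nlinarith
  have hand : (p ||| a <<< k) &&& (r <<< 1 ||| b) < 2 ^ (k + 1) :=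
    lt_of_le_of_lt Nat.and_le_left hnp
  rw [pvA_ck_cast, pvPop_sum (k + 1) _ hand]
  congr 2
  apply List.map_congr_left
  intro i hi
  have hik : i < k + 1 := List.mem_range.mp hi
  rw [pvShift_mod_two, pvShift_mod_two, pvShift_mod_two, Nat.testBit_and,
    pvRq2_testBit r q b k hq hb hbits i hik]
  cases hA : (p ||| a <<< k).testBit i <;> cases hB : (q ||| b <<< k).testBit (k - i) <;> simp

-- per-child equality, at the Int level of both ports
lemma pvChild_eq (k p q r a b : Nat) (hp : p < 2 ^ k) (hq : q < 2 ^ k)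
    (ha : a ≤ 1) (hb : b ≤ 1)
    (hbits : ∀ i, i < k → r.testBit i = q.testBit (k - 1 - i)) :
    pvA_ck (PySem.Int.bor (p : Int) ((a : Int) <<< k)) (PySem.Int.bor (q : Int) ((b : Int) <<< k)) k
      = ((PySem.Int.bitCount (PySem.Int.band (PySem.Int.bor (p : Int) ((a : Int) <<< k))
          (PySem.Int.bor ((r : Int) <<< 1) (b : Int))) : Nat) : Int) := by
  rw [show ((a : Int) <<< k) = ((a <<< k : Nat) : Int) from rfl,
    show ((b : Int) <<< k) = ((b <<< k : Nat) : Int) from rfl,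
    show ((r : Int) <<< 1) = ((r <<< 1 : Nat) : Int) from rfl,
    PySem.Int.bor_natCast, PySem.Int.bor_natCast, PySem.Int.bor_natCast,
    PySem.Int.band_natCast]
  exact pvCk_eq k p q r a b hp hq ha hb hbits

-- the new 4-tuple state satisfies the invariant at level k+1
lemma pvInv_child (k p q r a b : Nat) (hp : p < 2 ^ k) (hq : q < 2 ^ k) (hr : r < 2 ^ k)
    (ha : a ≤ 1) (hb : b ≤ 1) (Pk : Int)
    (hbits : ∀ i, i < k → r.testBit i = q.testBit (k - 1 - i)) :
    pvInv (k + 1) (PySem.Int.bor (p : Int) ((a : Int) <<< k),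
      PySem.Int.bor (q : Int) ((b : Int) <<< k), Pk,
      PySem.Int.bor ((r : Int) <<< 1) (b : Int)) := by
  have h2 : (2 : Nat) ^ (k + 1) = 2 * 2 ^ k := by ring
  have hpow : (0:Nat) < 2 ^ k := Nat.two_pow_pos k
  have hshift : ∀ c : Nat, c ≤ 1 → c <<< k < 2 ^ (k + 1) := by
    intro c hc
    rw [Nat.shiftLeft_eq]
    nlinarith
  refine ⟨p ||| a <<< k, q ||| b <<< k, r <<< 1 ||| b, ?_, ?_, ?_, ?_, ?_, ?_, ?_⟩
  · rw [show ((a : Int) <<< k) = ((a <<< k : Nat) : Int) from rfl, PySem.Int.bor_natCast]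
  · rw [show ((b : Int) <<< k) = ((b <<< k : Nat) : Int) from rfl, PySem.Int.bor_natCast]
  · rw [show ((r : Int) <<< 1) = ((r <<< 1 : Nat) : Int) from rfl, PySem.Int.bor_natCast]
  · exact Nat.or_lt_two_pow (by omega) (hshift a ha)
  · exact Nat.or_lt_two_pow (by omega) (hshift b hb)
  · apply Nat.or_lt_two_pow
    · rw [Nat.shiftLeft_eq]; omega
    · omega
  · exact pvRq2_testBit r q b k hq hb hbits

-- one state of the level fold: A's step on the projection matches the intermediate step
lemma pvStep_eq (target Mk : Int) (k : Nat) (htar : target = 0 ∨ target = 1)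
    (s : Int × Int × Int × Int) (hs : pvInv k s)
    (accA : List (Int × Int × Int) × Int) (accB : List (Int × Int × Int × Int) × Int)
    (h1 : accA.1 = accB.1.map pvProj) (h2 : accA.2 = accB.2) :
    (pvA_step target Mk k accA (pvProj s)).1 = (pvS_step target Mk k accB s).1.map pvProj ∧
    (pvA_step target Mk k accA (pvProj s)).2 = (pvS_step target Mk k accB s).2 ∧
    ∀ s' ∈ (pvS_step target Mk k accB s).1, s' ∈ accB.1 ∨ pvInv (k + 1) s' := by
  obtain ⟨p, q, r, e1, e2, e3, hp, hq, hr, hbits⟩ := hs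
  obtain ⟨pp, qq, P, rq⟩ := s
  simp only at e1 e2 e3
  subst e1 e2 e3
  have hPold : PySem.Int.band (((p : Int) * (q : Int)) >>> k) 1 = 0 ∨
      PySem.Int.band (((p : Int) * (q : Int)) >>> k) 1 = 1 := by
    rw [show ((p : Int) * (q : Int)) = ((p * q : Nat) : Int) by push_cast; ring,
      show (((p * q : Nat) : Int) >>> k) = ((p * q) >>> k : Nat) from rfl,
      PySem.Int.band_one, PySem.Int.mod_eq_emod_of_pos (by norm_num)]
    omega
  have hck0 := pvChild_eq k p q r 0 0 hp hq (by omega) (by omega) hbits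
  have hck1 := pvChild_eq k p q r 1 1 hp hq (by omega) (by omega) hbits
  have hck01 := pvChild_eq k p q r 0 1 hp hq (by omega) (by omega) hbits
  have hck10 := pvChild_eq k p q r 1 0 hp hq (by omega) (by omega) hbits
  have hiv00 := pvInv_child k p q r 0 0 hp hq hr (by omega) (by omega)
  have hiv11 := pvInv_child k p q r 1 1 hp hq hr (by omega) (by omega)
  have hiv01 := pvInv_child k p q r 0 1 hp hq hr (by omega) (by omega)
  have hiv10 := pvInv_child k p q r 1 0 hp hq hr (by omega) (by omega)
  simp only [Nat.cast_zero, Nat.cast_one, Int.zero_shiftLeft, PySem.Int.bor_zero]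
    at hck0 hck1 hck01 hck10 hiv00 hiv11 hiv01 hiv10
  rcases htar with ht | ht <;> rcases hPold with hP | hP <;>
    · simp only [pvA_step, pvS_step, pvB_child, pvProj, ht, hP, List.foldl_cons, List.foldl_nil,
        show PySem.Int.bxor 0 0 = 0 from by decide, show PySem.Int.bxor 0 1 = 1 from by decide,
        show PySem.Int.bxor 1 0 = 1 from by decide, show PySem.Int.bxor 1 1 = 0 from by decide,
        Int.zero_shiftLeft, PySem.Int.bor_zero, if_neg (by decide : (1 : Int) ≠ 0)]
      refine ⟨?_, ?_, ?_⟩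
      · simp [pvProj, h1, hck0, hck1, hck01, hck10]
      · simp [h2, hck0, hck1, hck01, hck10]
      · intro s' hs'
        simp only [List.mem_cons] at hs'
        rcases hs' with h | h | h
        · right; rw [h]; first
            | exact hiv11 _ hbits | exact hiv00 _ hbits | exact hiv01 _ hbits | exact hiv10 _ hbits
        · right; rw [h]; first
            | exact hiv11 _ hbits | exact hiv00 _ hbits | exact hiv01 _ hbits | exact hiv10 _ hbits
        · left; exact h

-- the level fold, relating A's and the intermediate's accumulators
lemma pvFold_eq (target Mk : Int) (k : Nat) (htar : target = 0 ∨ target = 1) :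
    ∀ (sb : List (Int × Int × Int × Int)) (accB : List (Int × Int × Int × Int) × Int)
      (accA : List (Int × Int × Int) × Int),
      accA.1 = accB.1.map pvProj → accA.2 = accB.2 →
      (∀ s ∈ sb, pvInv k s) → (∀ s ∈ accB.1, pvInv (k + 1) s) →
      ((sb.map pvProj).foldl (pvA_step target Mk k) accA).1
          = ((sb.foldl (pvS_step target Mk k) accB).1).map pvProj ∧
      ((sb.map pvProj).foldl (pvA_step target Mk k) accA).2
          = (sb.foldl (pvS_step target Mk k) accB).2 ∧
      ∀ s' ∈ (sb.foldl (pvS_step target Mk k) accB).1, pvInv (k + 1) s'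
  | [], accB, accA, h1, h2, _, haccinv => by
      simp only [List.map_nil, List.foldl_nil]
      exact ⟨h1, h2, haccinv⟩
  | s :: sb, accB, accA, h1, h2, hinv, haccinv => by
      rw [List.map_cons, List.foldl_cons, List.foldl_cons]
      obtain ⟨g1, g2, g3⟩ := pvStep_eq target Mk k htar s (hinv s (by simp)) accA accB h1 h2
      exact pvFold_eq target Mk k htar sb _ _ g1 g2
        (fun t ht => hinv t (by simp [ht]))
        (fun t ht => (g3 t ht).elim (fun h => haccinv t h) id)

-- one whole level
lemma pvLevel_eq (target Mk : Int) (k : Nat) (htar : target = 0 ∨ target = 1)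
    (sb : List (Int × Int × Int × Int)) (hinv : ∀ s ∈ sb, pvInv k s) :
    (pvA_level target Mk k (sb.map pvProj)).1 = ((pvS_level target Mk k sb).1).map pvProj ∧
    (pvA_level target Mk k (sb.map pvProj)).2 = (pvS_level target Mk k sb).2 ∧
    ∀ s' ∈ (pvS_level target Mk k sb).1, pvInv (k + 1) s' := by
  obtain ⟨g1, g2, g3⟩ := pvFold_eq target Mk k htar sb ([], 0) ([], 0) rfl rfl hinv (by simp)
  unfold pvA_level pvS_level
  refine ⟨?_, g2, ?_⟩
  · simp [g1, List.map_reverse]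
  · intro s' hs'
    exact g3 s' (by simpa using hs')

-- the main loop
lemma pvLoop_eq (N : Int) (N_bits : List Int) :
    ∀ (n k : Nat) (sb : List (Int × Int × Int × Int)) (curve : List (Int × Int × Int)),
      (∀ j : Nat, k ≤ j → j < k + n →
        PySem.List.pyGetD N_bits (j : Int) 0 = PySem.Int.band (N >>> j) 1) →
      (∀ s ∈ sb, pvInv k s) →
      pvA_loop N N_bits k (sb.map pvProj) curve n = pvS_loop N k sb curve n
  | 0, k, sb, curve, _, _ => rfl
  | n + 1, k, sb, curve, hbitsN, hinv => by
      have htargets : PySem.List.pyGetD N_bits (k : Int) 0 = PySem.Int.band (N >>> k) 1 :=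
        hbitsN k (le_refl k) (by omega)
      have htar : PySem.Int.band (N >>> k) 1 = 0 ∨ PySem.Int.band (N >>> k) 1 = 1 := by
        rw [PySem.Int.band_one, PySem.Int.mod_eq_emod_of_pos (by norm_num)]
        omega
      obtain ⟨g1, g2, g3⟩ := pvLevel_eq (PySem.Int.band (N >>> k) 1)
        (PySem.Int.mod N ((1 : Int) <<< (k + 1))) k htar sb hinv
      simp only [pvA_loop, pvS_loop, htargets, g1, g2, List.length_map]
      split
      · rfl
      · exact pvLoop_eq N N_bits n (k + 1) _ _
          (fun j hj1 hj2 => hbitsN j (by omega) (by omega)) g3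

-- the precomputed N_bits list agrees with direct bit extraction at all indices the loop reads
lemma pvNbits_get (N mp : Int) (j : Nat) (h1 : 1 ≤ j) (h2 : j < 1 + (mp - 1).toNat) :
    PySem.List.pyGetD (pvA_Nbits N mp) (j : Int) 0 = PySem.Int.band (N >>> j) 1 := by
  have hmp : 2 ≤ mp := by omega
  have hn : mp + 1 = (((mp + 1).toNat : Nat) : Int) := by omega
  have hjn : j < (mp + 1).toNat := by omega
  unfold pvA_Nbits
  rw [hn, PySem.List.pyGetD_map_pyRange _ _ _ _ hjn]
  simp [Int.shiftRight_natCast_right]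

theorem pvMainA (N mp : Int) :
    pvA_loop N (pvA_Nbits N mp) 1 [(1, 1, 1)] [] (mp - 1).toNat
      = pvS_loop N 1 [(1, 1, 1, 1)] [] (mp - 1).toNat := by
  have hinit : ∀ s ∈ [((1 : Int), (1 : Int), (1 : Int), (1 : Int))], pvInv 1 s := by
    intro s hs
    simp only [List.mem_singleton] at hs
    subst hs
    refine ⟨1, 1, 1, by norm_num, by norm_num, by norm_num, by norm_num, by norm_num, by norm_num, ?_⟩
    intro i hi
    interval_cases i
    rfl
  exact pvLoop_eq N (pvA_Nbits N mp) (mp - 1).toNat 1 [(1, 1, 1, 1)] []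
    (fun j hj1 hj2 => pvNbits_get N mp j hj1 hj2) hinit

-- ---- part 2: the intermediate BFS equals B's DFS curve (pure list algebra) ----

-- the two children of a state, in BFS emission order
def pvChn (t : Int) (k : Nat) (s : Int × Int × Int × Int) : List (Int × Int × Int × Int) :=
  let xor := PySem.Int.bxor t (PySem.Int.band ((s.1 * s.2.1) >>> k) 1)
  [pvB_child k s.1 s.2.1 s.2.2.1 s.2.2.2 xor 0, pvB_child k s.1 s.2.1 s.2.2.1 s.2.2.2 xor 1]

-- a state's contribution to the level's c0
def pvHits (t M : Int) (k : Nat) (s : Int × Int × Int × Int) : Int :=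
  ((pvChn t k s).map (fun c => if c.2.2.1 = M then (1 : Int) else 0)).sum

-- pointwise sum of the DFS lists of a list of states
def pvSumDfs (N : Int) (m k : Nat) (sb : List (Int × Int × Int × Int)) : List Int :=
  (sb.map (fun s => pvB_dfs N m k s.1 s.2.1 s.2.2.1 s.2.2.2)).foldr
    (List.zipWith (· + ·)) (List.replicate m 0)

lemma pvZipAdd_len (l1 l2 : List Int) : (List.zipWith (· + ·) l1 l2).length = min l1.length l2.length :=
  List.length_zipWith ..

lemma pvZipAdd_zero_right : ∀ (l : List Int), List.zipWith (· + ·) l (List.replicate l.length 0) = l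
  | [] => rfl
  | x :: l => by simp [List.replicate_succ, pvZipAdd_zero_right l]

lemma pvZipAdd_zero_left : ∀ (l : List Int), List.zipWith (· + ·) (List.replicate l.length 0) l = l
  | [] => rfl
  | x :: l => by simp [List.replicate_succ, pvZipAdd_zero_left l]

lemma pvZipAdd_zero_right' (m : Nat) (l : List Int) (h : l.length = m) :
    List.zipWith (· + ·) l (List.replicate m 0) = l := by
  subst h; exact pvZipAdd_zero_right l

lemma pvZipAdd_zero_left' (m : Nat) (l : List Int) (h : l.length = m) :
    List.zipWith (· + ·) (List.replicate m 0) l = l := by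
  subst h; exact pvZipAdd_zero_left l

lemma pvZipAdd_assoc : ∀ (a b c : List Int),
    List.zipWith (· + ·) a (List.zipWith (· + ·) b c)
      = List.zipWith (· + ·) (List.zipWith (· + ·) a b) c
  | [], _, _ => by simp
  | _, [], _ => by simp
  | _ :: _, _ :: _, [] => by simp
  | x :: a, y :: b, z :: c => by
      simp only [List.zipWith_cons_cons, pvZipAdd_assoc a b c]
      ring_nf

lemma pvB_dfs_length (N : Int) : ∀ (m k : Nat) (p q P rq : Int),
    (pvB_dfs N m k p q P rq).length = m
  | 0, _, _, _, _, _ => rfl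
  | m + 1, k, p, q, P, rq => by
      simp only [pvB_dfs, List.length_cons, pvZipAdd_len, pvB_dfs_length N m]
      omega

lemma pvSumDfs_length (N : Int) (m k : Nat) (sb : List (Int × Int × Int × Int)) :
    (pvSumDfs N m k sb).length = m := by
  induction sb with
  | nil => simp [pvSumDfs]
  | cons s sb ih =>
      simp only [pvSumDfs, List.map_cons, List.foldr_cons] at *
      rw [pvZipAdd_len, ih, pvB_dfs_length]
      omega

lemma pvSumDfs_append (N : Int) (m k : Nat) (l1 l2 : List (Int × Int × Int × Int)) :
    pvSumDfs N m k (l1 ++ l2)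
      = List.zipWith (· + ·) (pvSumDfs N m k l1) (pvSumDfs N m k l2) := by
  induction l1 with
  | nil =>
      simp only [List.nil_append]
      exact (pvZipAdd_zero_left' m _ (pvSumDfs_length N m k l2)).symm
  | cons s l1 ih =>
      simp only [List.cons_append, pvSumDfs, List.map_cons, List.foldr_cons] at *
      rw [ih, pvZipAdd_assoc]

-- unrolling one level of the DFS sum: head = total hits, tail = DFS sum of all children
lemma pvSumDfs_succ (N : Int) (m k : Nat) (sb : List (Int × Int × Int × Int)) :
    pvSumDfs N (m + 1) k sb
      = ((sb.map (pvHits (PySem.Int.band (N >>> k) 1)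
            (PySem.Int.mod N ((1 : Int) <<< (k + 1))) k)).sum)
        :: pvSumDfs N m (k + 1)
            (sb.flatMap (pvChn (PySem.Int.band (N >>> k) 1) k)) := by
  induction sb with
  | nil => simp [pvSumDfs, List.replicate_succ]
  | cons s sb ih =>
      have hflat : (s :: sb).flatMap (pvChn (PySem.Int.band (N >>> k) 1) k)
          = pvChn (PySem.Int.band (N >>> k) 1) k s
            ++ sb.flatMap (pvChn (PySem.Int.band (N >>> k) 1) k) := by
        simp
      rw [hflat, pvSumDfs_append]
      have hone : pvB_dfs N (m + 1) k s.1 s.2.1 s.2.2.1 s.2.2.2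
          = pvHits (PySem.Int.band (N >>> k) 1) (PySem.Int.mod N ((1 : Int) <<< (k + 1))) k s
            :: pvSumDfs N m (k + 1) (pvChn (PySem.Int.band (N >>> k) 1) k s) := by
        simp only [pvB_dfs, pvHits, pvChn, pvSumDfs, List.map_cons, List.map_nil,
          List.foldr_cons, List.foldr_nil, List.sum_cons, List.sum_nil]
        congr 1
        · ring
        · exact congrArg _ (pvZipAdd_zero_right' m _ (pvB_dfs_length N m _ _ _ _ _)).symm
      simp only [pvSumDfs, List.map_cons, List.foldr_cons] at *
      rw [hone, ih]
      simp

-- the intermediate level emits exactly the flat list of children and sums exactly the hits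
lemma pvS_fold_struct (t M : Int) (k : Nat) :
    ∀ (sb : List (Int × Int × Int × Int)) (acc : List (Int × Int × Int × Int) × Int),
      (sb.foldl (pvS_step t M k) acc).1 = (sb.flatMap (pvChn t k)).reverse ++ acc.1 ∧
      (sb.foldl (pvS_step t M k) acc).2 = acc.2 + (sb.map (pvHits t M k)).sum
  | [], acc => by simp
  | s :: sb, acc => by
      obtain ⟨g1, g2⟩ := pvS_fold_struct t M k sb (pvS_step t M k acc s)
      have hstep1 : (pvS_step t M k acc s).1 = (pvChn t k s).reverse ++ acc.1 := by
        simp [pvS_step, pvChn]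
      have hstep2 : (pvS_step t M k acc s).2 = acc.2 + pvHits t M k s := by
        simp only [pvS_step, pvChn, pvHits, List.foldl_cons, List.foldl_nil,
          List.map_cons, List.map_nil, List.sum_cons, List.sum_nil]
        split_ifs <;> ring
      constructor
      · rw [List.foldl_cons, g1, hstep1]
        simp
      · rw [List.foldl_cons, g2, hstep2]
        simp only [List.map_cons, List.sum_cons]
        ring

lemma pvS_level_struct (t M : Int) (k : Nat) (sb : List (Int × Int × Int × Int)) :
    (pvS_level t M k sb).1 = sb.flatMap (pvChn t k) ∧
    (pvS_level t M k sb).2 = (sb.map (pvHits t M k)).sum := by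
  obtain ⟨g1, g2⟩ := pvS_fold_struct t M k sb ([], 0)
  unfold pvS_level
  refine ⟨?_, ?_⟩ <;> simp [g1, g2]

lemma pvChn_len (t : Int) (k : Nat) (sb : List (Int × Int × Int × Int)) :
    (sb.flatMap (pvChn t k)).length = 2 * sb.length := by
  induction sb with
  | nil => simp
  | cons s sb ih => simp [pvChn, ih]; omega

-- how many levels the loop emits before fuel or the break ends it
def pvEmit : Nat → Nat → Nat
  | 0, _ => 0
  | n + 1, k => 1 + (if 2 ^ k > 1500000 then 0 else pvEmit n (k + 1))

lemma pvBreak_iff (k : Nat) : 2 ^ k > 1500000 ↔ 21 ≤ k := by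
  constructor
  · intro h
    by_contra hk
    have : (2:Nat) ^ k ≤ 2 ^ 20 := Nat.pow_le_pow_right (by omega) (by omega)
    norm_num at this
    omega
  · intro h
    have : (2:Nat) ^ 21 ≤ 2 ^ k := Nat.pow_le_pow_right (by omega) h
    norm_num at this
    omega

lemma pvEmit_eq : ∀ (n k : Nat), pvEmit n k = min n (if k ≤ 21 then 22 - k else 1)
  | 0, k => by simp [pvEmit]
  | n + 1, k => by
      rw [pvEmit, pvEmit_eq n (k + 1)]
      by_cases hk : 21 ≤ k
      · rw [if_pos ((pvBreak_iff k).mpr hk)]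
        split_ifs <;> omega
      · rw [if_neg (by rw [pvBreak_iff]; omega)]
        split_ifs <;> omega

-- the intermediate BFS, expressed through the DFS sums
lemma pvS_to_dfs (N : Int) :
    ∀ (n k : Nat) (sb : List (Int × Int × Int × Int)) (curve : List (Int × Int × Int)),
      1 ≤ k → sb.length = 2 ^ (k - 1) →
      pvS_loop N k sb curve n
        = curve ++ (List.range (pvEmit n k)).map
            (fun j => (((k + j : Nat) : Int), ((2 : Int) ^ (k + j)),
              (pvSumDfs N (pvEmit n k) k sb).getD j 0))
  | 0, k, sb, curve, _, _ => by simp [pvS_loop, pvEmit]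
  | n + 1, k, sb, curve, hk, hlen => by
      obtain ⟨hl1, hl2⟩ := pvS_level_struct (PySem.Int.band (N >>> k) 1)
        (PySem.Int.mod N ((1 : Int) <<< (k + 1))) k sb
      have hclen : (pvS_level (PySem.Int.band (N >>> k) 1)
          (PySem.Int.mod N ((1 : Int) <<< (k + 1))) k sb).1.length = 2 ^ k := by
        rw [hl1, pvChn_len, hlen, ← Nat.pow_succ']
        congr 1
        omega
      have hcnt : ((pvS_level (PySem.Int.band (N >>> k) 1)
          (PySem.Int.mod N ((1 : Int) <<< (k + 1))) k sb).1.length : Int) = (2 : Int) ^ k := by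
        rw [hclen]; push_cast; ring
      have hsum := pvSumDfs_succ N (pvEmit (n + 1) k - 1) k sb
      have hemit : pvEmit (n + 1) k = 1 + (if 2 ^ k > 1500000 then 0 else pvEmit n (k + 1)) := rfl
      rw [pvS_loop]
      by_cases hbr : (pvS_level (PySem.Int.band (N >>> k) 1)
          (PySem.Int.mod N ((1 : Int) <<< (k + 1))) k sb).1.length > 1500000
      · rw [if_pos hbr]
        have hb2 : 2 ^ k > 1500000 := by rw [← hclen]; exact hbr
        have he : pvEmit (n + 1) k = 1 := by rw [hemit, if_pos hb2]
        rw [he]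
        have : pvSumDfs N 1 k sb = (sb.map (pvHits (PySem.Int.band (N >>> k) 1)
            (PySem.Int.mod N ((1 : Int) <<< (k + 1))) k)).sum
              :: pvSumDfs N 0 (k + 1) (sb.flatMap (pvChn (PySem.Int.band (N >>> k) 1) k)) :=
          pvSumDfs_succ N 0 k sb
        simp [this, hcnt, hl2]
      · rw [if_neg hbr]
        have hb2 : ¬ 2 ^ k > 1500000 := by rw [← hclen]; exact hbr
        have he : pvEmit (n + 1) k = pvEmit n (k + 1) + 1 := by
          rw [hemit, if_neg hb2]; omega
        rw [pvS_to_dfs N n (k + 1) _ _ (by omega) (by rw [hl1, pvChn_len, hlen, ← Nat.pow_succ']; congr 1; omega)]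
        rw [he, List.range_succ_eq_map]
        have hunroll : pvSumDfs N (pvEmit n (k + 1) + 1) k sb
            = ((sb.map (pvHits (PySem.Int.band (N >>> k) 1)
                (PySem.Int.mod N ((1 : Int) <<< (k + 1))) k)).sum)
              :: pvSumDfs N (pvEmit n (k + 1)) (k + 1)
                  (sb.flatMap (pvChn (PySem.Int.band (N >>> k) 1) k)) :=
          pvSumDfs_succ N (pvEmit n (k + 1)) k sb
        simp only [List.map_cons, List.map_map, List.append_assoc, List.singleton_append,
          hunroll, hl1, List.getD_cons_zero, Nat.add_zero]
        congr 1
        congr 1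
        · refine congrArg₂ Prod.mk rfl (congrArg₂ Prod.mk ?_ hl2)
          rw [← hl1]
          exact hcnt
        · apply List.map_congr_left
          intro j _
          simp only [Function.comp, List.getD_cons_succ]
          refine congrArg₂ Prod.mk ?_ (congrArg₂ Prod.mk ?_ rfl)
          · congr 1
            omega
          · congr 1
            omega

-- B's final comprehension, expressed through the same range-map
lemma pvAlt_curve (N : Int) (d : Nat) :
    (PySem.List.pyRange 1 ((d : Int) + 1) 1).map
        (fun k => (k, (1 : Int) <<< k, PySem.List.pyGetD (pvB_dfs N d 1 1 1 1 1) (k - 1) 0))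
      = (List.range d).map
          (fun j => (((1 + j : Nat) : Int), ((2 : Int) ^ (1 + j)),
            (pvSumDfs N d 1 [(1, 1, 1, 1)]).getD j 0)) := by
  have hone : pvSumDfs N d 1 [((1:Int), (1:Int), (1:Int), (1:Int))] = pvB_dfs N d 1 1 1 1 1 := by
    simp only [pvSumDfs, List.map_cons, List.map_nil, List.foldr_cons, List.foldr_nil]
    rw [show (List.replicate d (0:Int)) = List.replicate (pvB_dfs N d 1 1 1 1 1).length 0
        by rw [pvB_dfs_length]]
    exact pvZipAdd_zero_right _
  rw [hone, PySem.List.pyRange_one, show ((d : Int) + 1 - 1) = (d : Int) by ring, Int.toNat_natCast,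
    List.map_map]
  apply List.map_congr_left
  intro j hj
  have hjd : j < d := List.mem_range.mp hj
  simp only [Function.comp]
  have h2 : ((1 : Int) + j - 1) = ((j : Nat) : Int) := by push_cast; ring
  rw [h2, PySem.List.pyGetD_natCast]
  refine congrArg₂ Prod.mk ?_ (congrArg₂ Prod.mk ?_ rfl)
  · push_cast; ring
  · rw [show ((1 : Int) + (j : Int)) = (((1 + j : Nat) : Nat) : Int) by push_cast; ring,
      Int.one_shiftLeft]
    push_cast
    ring

-- putting both halves together
theorem pvMain (N mp : Int) :
    pvA_loop N (pvA_Nbits N mp) 1 [(1, 1, 1)] [] (mp - 1).toNat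
      = (PySem.List.pyRange 1 (((min (mp - 1) ((PySem.Int.bitLength 1500000 : Nat) : Int)).toNat : Int) + 1) 1).map
          (fun k => (k, (1 : Int) <<< k,
            PySem.List.pyGetD (pvB_dfs N (min (mp - 1) ((PySem.Int.bitLength 1500000 : Nat) : Int)).toNat 1 1 1 1 1) (k - 1) 0)) := by
  have hcut : (PySem.Int.bitLength 1500000 : Nat) = 21 := by decide
  have hdep : (min (mp - 1) ((21 : Nat) : Int)).toNat = min (mp - 1).toNat 21 := by omega
  have hE : pvEmit (mp - 1).toNat 1 = min (mp - 1).toNat 21 := by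
    rw [pvEmit_eq]; norm_num
  rw [pvMainA, pvS_to_dfs N (mp - 1).toNat 1 [(1,1,1,1)] [] (by omega) (by simp),
    hcut, hdep, pvAlt_curve, ← hE]
  simp

-- ===== VERDICT (by name: the statement is the Claim_ definition above) =====
theorem fast_bfs_entropy_spec : Claim_equal_fast_bfs_entropy := by
  intro N max_pos _
  unfold Spec_fast_bfs_entropy fast_bfs_entropy fast_bfs_entropy_alt
  cases max_pos with
  | none => exact pvMain N _
  | some m => exact pvMain N m
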